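-- pv_equiv track=rewrite | github.com/dijasila/GPAW | gpaw/directmin/tools.py | array_to_dict
-- ===== SOURCE A (Python) =====
-- def array_to_dict(x, dim):
--     """
--     Converts long array to dictionary with integer keys with values of
--     dimensionality specified in dim.
--
--     :param x: Array
--     :param dim: List with dimensionalities of parts of the dictionary
--     :return: Dictionary
--     """
--     y = {}
--     start = 0
--     stop = 0
--     for i in range(len(dim)):
--         stop += dim[i]
--         y[i] = x[start: stop]
--         start += dim[i]
--     return y
-- ===== SOURCE B (Python) =====
-- def array_to_dict(x, dim):
--     """
--     Converts long array to dictionary with integer keys with values of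
--     dimensionality specified in dim.
--
--     :param x: Array
--     :param dim: List with dimensionalities of parts of the dictionary
--     :return: Dictionary
--     """
--     def chunks(off, key, ds):
--         # list of (key, slice) pairs for the dims ds starting at offset off
--         if not ds:
--             return []
--         if len(ds) == 1:
--             return [(key, x[off: off + ds[0]])]
--         mid = len(ds) // 2
--         return (chunks(off, key, ds[:mid])
--                 + chunks(off + sum(ds[:mid]), key + mid, ds[mid:]))
--     return dict(chunks(0, 0, dim))
-- ===== Notes on version B (the rewrite author's own statement) =====
-- stated objective: alternative
-- what changed: B computes the (key, slice) pairs by divide-and-conquer recursion on dim - split dim in half, recurse on each half with the right offset/key, concatenate - instead of A's single left-to-right loop threading running start/stop accumulators.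
import Mathlib
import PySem

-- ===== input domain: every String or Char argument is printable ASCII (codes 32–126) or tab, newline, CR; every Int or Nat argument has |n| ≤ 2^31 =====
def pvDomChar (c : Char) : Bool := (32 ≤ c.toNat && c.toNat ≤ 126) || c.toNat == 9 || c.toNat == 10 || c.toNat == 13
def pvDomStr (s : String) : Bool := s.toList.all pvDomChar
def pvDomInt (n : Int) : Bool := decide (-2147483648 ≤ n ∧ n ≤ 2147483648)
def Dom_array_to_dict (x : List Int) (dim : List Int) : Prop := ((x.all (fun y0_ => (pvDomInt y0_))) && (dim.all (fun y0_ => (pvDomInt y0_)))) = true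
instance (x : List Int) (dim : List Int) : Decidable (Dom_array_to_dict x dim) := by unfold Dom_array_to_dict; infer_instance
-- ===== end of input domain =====

-- B builds the (key, slice) pairs by divide-and-conquer recursion on dim instead of A's
-- left-to-right loop with running start/stop accumulators (alternative decomposition).

-- ===== PORT A =====
-- the 'for i in range(len(dim))' loop: structural recursion over dim, threading (y, start, stop) and the index i
def pvLoopA (x : List Int) : List Int → PySem.Dict Int (List Int) → Int → Int → Nat → PySem.Dict Int (List Int)
  | [], y, _, _, _ => y
  | d :: rest, y, start, stop, i =>
      let stop' := stop + d
      let y' := y.insert (i : Int) (PySem.List.slice x (some start) (some stop'))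
      let start' := start + d
      pvLoopA x rest y' start' stop' (i + 1)

def array_to_dict (x : List Int) (dim : List Int) : List (Int × List Int) :=
  (pvLoopA x dim PySem.Dict.empty 0 0 0).items

-- ===== PORT B =====
-- 'chunks(off, key, ds)': divide-and-conquer on ds; ds[:mid]/ds[mid:] with the natural
-- number mid = len(ds)//2 (Lean's Nat '/' coincides with Python '//' on nonnegatives) are
-- exactly take/drop (PySem.List.slice_to_natCast/slice_from_natCast), sum(...) is List.sum,
-- and dict(pairs) with pairwise-distinct keys is that association list.  The fuel argument
-- (started at ds.length, strictly above every recursive call's depth need) only makes the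
-- same computation structurally total.
def pvChunksB (x : List Int) : Nat → Int → Int → List Int → List (Int × List Int)
  | _, _, _, [] => []
  | 0, _, _, _ :: _ => []   -- unreachable with fuel ≥ ds.length
  | _ + 1, off, key, [d] => [(key, PySem.List.slice x (some off) (some (off + d)))]
  | fuel + 1, off, key, a :: b :: rest =>
      let mid := (a :: b :: rest).length / 2
      pvChunksB x fuel off key ((a :: b :: rest).take mid)
        ++ pvChunksB x fuel (off + ((a :: b :: rest).take mid).sum) (key + (mid : Int))
            ((a :: b :: rest).drop mid)

def array_to_dict_alt (x : List Int) (dim : List Int) : List (Int × List Int) :=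
  pvChunksB x dim.length 0 0 dim

-- ===== PRECONDITION & SPEC =====
def Spec_array_to_dict (x : List Int) (dim : List Int) (out : List (Int × List Int)) : Prop := out = array_to_dict_alt x dim
instance (x : List Int) (dim : List Int) (out : List (Int × List Int)) : Decidable (Spec_array_to_dict x dim out) := by unfold Spec_array_to_dict; infer_instance

-- ===== CLAIM =====
def Claim_equal_array_to_dict : Prop := ∀ (x : List Int) (dim : List Int), Dom_array_to_dict x dim → Spec_array_to_dict x dim (array_to_dict x dim)

-- ===== LEMMAS AND PROOFS =====

-- common specification: the list of (key, slice) chunks starting at offset s with first key k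
def pvChunks (x : List Int) : Int → Nat → List Int → List (Int × List Int)
  | _, _, [] => []
  | s, k, d :: ds =>
      ((k : Int), PySem.List.slice x (some s) (some (s + d))) :: pvChunks x (s + d) (k + 1) ds

theorem pvLoopA_spec (x : List Int) : ∀ (ds : List Int) (y : PySem.Dict Int (List Int)) (s : Int) (k : Nat),
    (∀ j : Nat, k ≤ j → y.contains (j : Int) = false) →
    (pvLoopA x ds y s s k).items = y.items ++ pvChunks x s k ds := by
  intro ds
  induction ds with
  | nil => intro y s k _; simp [pvLoopA, pvChunks]
  | cons d rest ih =>
      intro y s k hfresh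
      have hk : y.contains (k : Int) = false := hfresh k le_rfl
      have hfresh' : ∀ j : Nat, k + 1 ≤ j →
          (y.insert (k : Int) (PySem.List.slice x (some s) (some (s + d)))).contains (j : Int) = false := by
        intro j hj
        rw [PySem.Dict.contains_insert]
        have hjk : ((j : Int) == (k : Int)) = false := by
          simp only [beq_eq_false_iff_ne, ne_eq, Int.natCast_inj]
          omega
        rw [hjk, hfresh j (by omega)]
        rfl
      rw [pvLoopA, ih _ (s + d) (k + 1) hfresh',
          PySem.Dict.items_insert_of_not_contains _ _ hk]
      simp [pvChunks]

theorem pvChunks_append (x : List Int) : ∀ (l r : List Int) (s : Int) (k : Nat),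
    pvChunks x s k (l ++ r) = pvChunks x s k l ++ pvChunks x (s + l.sum) (k + l.length) r := by
  intro l
  induction l with
  | nil => intro r s k; simp [pvChunks]
  | cons d l ih =>
      intro r s k
      simp only [List.cons_append, pvChunks, ih r (s + d) (k + 1), List.sum_cons, List.length_cons]
      rw [show s + (d + l.sum) = s + d + l.sum by ring,
          show k + (l.length + 1) = k + 1 + l.length by ring]

theorem pvChunksB_eq (x : List Int) : ∀ (n : Nat) (ds : List Int), ds.length ≤ n →
    ∀ (s : Int) (k : Nat), pvChunksB x n s (k : Int) ds = pvChunks x s k ds := by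
  intro n
  induction n with
  | zero =>
      intro ds hds s k
      have : ds = [] := List.eq_nil_of_length_eq_zero (by omega)
      subst this
      rfl
  | succ n ih =>
      intro ds hds s k
      match ds with
      | [] => rfl
      | [d] => simp [pvChunksB, pvChunks]
      | a :: b :: rest =>
          rw [pvChunksB]
          have hlen : (a :: b :: rest).length = rest.length + 2 := by simp
          have hmid1 : 1 ≤ (a :: b :: rest).length / 2 := by omega
          have hmid2 : (a :: b :: rest).length / 2 < (a :: b :: rest).length := by omega
          have htake : ((a :: b :: rest).take ((a :: b :: rest).length / 2)).length ≤ n := by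
            simp only [List.length_take]; omega
          have hdrop : ((a :: b :: rest).drop ((a :: b :: rest).length / 2)).length ≤ n := by
            simp only [List.length_drop]; omega
          have hlt : ((a :: b :: rest).take ((a :: b :: rest).length / 2)).length
              = (a :: b :: rest).length / 2 := by
            simp only [List.length_take]; omega
          have hcast : (k : Int) + (((a :: b :: rest).length / 2 : Nat) : Int)
              = ((k + (a :: b :: rest).length / 2 : Nat) : Int) := by push_cast; ring
          have happ := pvChunks_append x ((a :: b :: rest).take ((a :: b :: rest).length / 2))
            ((a :: b :: rest).drop ((a :: b :: rest).length / 2)) s k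
          rw [List.take_append_drop] at happ
          rw [ih _ htake, hcast, ih _ hdrop, happ, hlt]

-- ===== VERDICT =====
theorem array_to_dict_spec : Claim_equal_array_to_dict := by
  intro x dim _
  unfold Spec_array_to_dict
  rw [array_to_dict, array_to_dict_alt,
      pvLoopA_spec x dim PySem.Dict.empty 0 0 (fun j _ => PySem.Dict.contains_empty _)]
  have h := pvChunksB_eq x dim.length dim le_rfl 0 0
  simp only [Nat.cast_zero] at h
  rw [h]
  rfl
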